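-- pv_equiv track=rewrite | github.com/znsoooo/lishixian | lishixian/doc.py | MergeCell
-- ===== SOURCE A (Python) =====
-- def MergeCell(data, merge, merge_x=True, merge_y=True, strip_x=False):
--     import copy
--     data2 = []
--     for sheet_data, sheet_merge in zip(data, merge):
--         sheet_data2 = copy.deepcopy(sheet_data)
--         # merge cell
--         for r1, r2, c1, c2 in sheet_merge:
--             for r in range(r1, r2):
--                 for c in range(c1, c2):
--                     if (not merge_x and c > c1) or (not merge_y and r > r1):
--                         sheet_data2[r][c] = None if strip_x else ''
--                     else:
--                         sheet_data2[r][c] = sheet_data[r1][c1]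
--         # strip x
--         if strip_x:
--             sheet_data2 = [[cell for cell in row if cell is not None] for row in sheet_data2]
--         data2.append(sheet_data2)
--         # remove blanks in tail
--         # for row in sheet_data:
--         #     while len(row) and row[-1] == '':  # Good!
--         #         row.pop()
--     return data2
-- ===== SOURCE B (Python) =====
-- def MergeCell(data, merge, merge_x=True, merge_y=True, strip_x=False):
--     out = []
--     for sheet_data, sheet_merge in zip(data, merge):
--         # pass 1: index every existing merged cell by its owning rectangle's anchor
--         # (rectangles clipped to the grid - cells that don't exist are never consulted;
--         # later rectangles overwrite earlier ones, like Python dict assignment)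
--         owner = {}
--         for r1, r2, c1, c2 in sheet_merge:
--             for r in range(max(r1, 0), min(r2, len(sheet_data))):
--                 for c in range(max(c1, 0), min(c2, len(sheet_data[r]))):
--                     owner[(r, c)] = (r1, c1)
--         # pass 2: render the sheet from the ownership index; blanks produced
--         # under strip_x are simply never appended
--         sheet2 = []
--         for r, row in enumerate(sheet_data):
--             new_row = []
--             for c, cell in enumerate(row):
--                 a = owner.get((r, c))
--                 if a is None:
--                     new_row.append(cell)
--                 else:
--                     r1, c1 = a
--                     if (not merge_x and c > c1) or (not merge_y and r > r1):
--                         if not strip_x: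
--                             new_row.append('')
--                     else:
--                         new_row.append(sheet_data[r1][c1])
--             sheet2.append(new_row)
--         out.append(sheet2)
--     return out
-- ===== Notes on version B (the rewrite author's own statement) =====
-- stated objective: alternative
-- what changed: Instead of deep-copying each sheet and mutating it rectangle by rectangle with a per-cell branch, B builds a hash index mapping each existing merged cell to its owning rectangle's anchor (rectangles clipped to the grid; later rectangles overwrite earlier, like dict assignment), then renders the output grid in one enumerate pass from that index, never appending strip_x blanks at all (no deepcopy, no in-place writes, no post-filter pass).
import Mathlib
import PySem

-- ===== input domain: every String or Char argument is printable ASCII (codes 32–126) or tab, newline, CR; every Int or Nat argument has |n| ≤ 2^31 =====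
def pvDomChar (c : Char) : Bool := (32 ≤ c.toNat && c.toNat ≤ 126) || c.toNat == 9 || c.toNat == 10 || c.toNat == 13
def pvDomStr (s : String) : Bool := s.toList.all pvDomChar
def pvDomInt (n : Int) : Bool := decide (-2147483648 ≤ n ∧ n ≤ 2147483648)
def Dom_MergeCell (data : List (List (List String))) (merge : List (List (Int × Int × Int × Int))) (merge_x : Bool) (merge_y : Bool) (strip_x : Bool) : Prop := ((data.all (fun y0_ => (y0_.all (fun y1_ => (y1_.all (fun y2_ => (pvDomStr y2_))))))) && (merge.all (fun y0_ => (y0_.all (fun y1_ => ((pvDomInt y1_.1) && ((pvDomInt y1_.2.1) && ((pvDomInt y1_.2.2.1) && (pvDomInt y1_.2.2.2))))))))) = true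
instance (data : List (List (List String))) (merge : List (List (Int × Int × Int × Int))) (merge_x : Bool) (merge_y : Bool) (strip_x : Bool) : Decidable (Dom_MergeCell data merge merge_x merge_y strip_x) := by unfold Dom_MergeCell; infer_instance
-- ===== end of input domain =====

-- B replaces A's deepcopy-and-mutate sweep by two passes: a hash index mapping every merged cell to
-- its owning rectangle's anchor (built once; later rectangles overwrite, like dict assignment), then
-- one enumerate pass rendering the output grid from that index, never appending strip_x blanks at
-- all; objective: alternative decomposition, same cost.
-- A's cells are modelled as Option String (none = Python's None, introduced only when strip_x).

-- A-side subscript helpers (Python's sheet[r][c] read / assignment; exact under Pre_)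
def cellGet (sd : List (List String)) (r c : Int) : String :=
  PySem.List.pyGetD (PySem.List.pyGetD sd r []) c ""

def cellSet (g : List (List (Option String))) (r c : Int) (v : Option String) :
    List (List (Option String)) :=
  PySem.List.pySetD g r (PySem.List.pySetD (PySem.List.pyGetD g r []) c v)

-- A's final '# strip x' step: drop None cells when strip_x; when ¬strip_x no cell is none,
-- so 'getD ""' unwraps exactly
def stripGrid (strip_x : Bool) (g : List (List (Option String))) : List (List String) :=
  if strip_x then g.map (fun row => row.filterMap id)
  else g.map (fun row => row.map (fun cell => cell.getD ""))

-- ===== PORT A =====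
def MergeCell (data : List (List (List String))) (merge : List (List (Int × Int × Int × Int))) (merge_x : Bool) (merge_y : Bool) (strip_x : Bool) : List (List (List String)) :=
  (data.zip merge).foldl (fun data2 p =>
    data2 ++ [stripGrid strip_x (p.2.foldl (fun g rect =>
      (PySem.List.pyRange rect.1 rect.2.1 1).foldl (fun g r =>
        (PySem.List.pyRange rect.2.2.1 rect.2.2.2 1).foldl (fun g c =>
          if (!merge_x && decide (rect.2.2.1 < c)) || (!merge_y && decide (rect.1 < r)) then
            cellSet g r c (if strip_x then none else some "")
          else
            cellSet g r c (some (cellGet p.1 rect.1 rect.2.2.1))) g) g)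
      (p.1.map (fun row => row.map some)))]) []

-- ===== PORT B =====
-- pass 1 of Source B: owner[(r, c)] = (r1, c1) for every existing cell of every rectangle
-- (rectangles clipped to the grid, as in Source B)
def ownerIndex (sd : List (List String)) (sm : List (Int × Int × Int × Int)) :
    PySem.Dict (Int × Int) (Int × Int) :=
  sm.foldl (fun d rect =>
    (PySem.List.pyRange (max rect.1 0) (min rect.2.1 (sd.length : Int)) 1).foldl (fun d r =>
      (PySem.List.pyRange (max rect.2.2.1 0)
          (min rect.2.2.2 ((PySem.List.pyGetD sd r []).length : Int)) 1).foldl (fun d c =>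
        d.insert (r, c) (rect.1, rect.2.2.1)) d) d) PySem.Dict.empty

-- pass 2 of Source B, inner loop: one output row from the ownership index
def renderRow (sd : List (List String)) (owner : PySem.Dict (Int × Int) (Int × Int))
    (merge_x merge_y strip_x : Bool) (r : Int) (row : List String) : List String :=
  (PySem.List.enumerate row 0).foldl (fun nr cp =>
    match owner.get? (r, cp.1) with
    | none => nr ++ [cp.2]
    | some a =>
      if (!merge_x && decide (a.2 < cp.1)) || (!merge_y && decide (a.1 < r)) then
        if !strip_x then nr ++ [""] else nr
      else nr ++ [cellGet sd a.1 a.2]) []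

def MergeCell_alt (data : List (List (List String))) (merge : List (List (Int × Int × Int × Int))) (merge_x : Bool) (merge_y : Bool) (strip_x : Bool) : List (List (List String)) :=
  (data.zip merge).foldl (fun out p =>
    let owner := ownerIndex p.1 p.2
    out ++ [(PySem.List.enumerate p.1 0).foldl (fun sh rp =>
      sh ++ [renderRow p.1 owner merge_x merge_y strip_x rp.1 rp.2]) []]) []

-- ===== PRECONDITION & SPEC =====
-- Pre_ requires every cell index visited by a merge rectangle to be nonnegative and in range:
-- on out-of-range indices A raises IndexError, and on negative in-range indices A's fill pattern is
-- an accident of Python's negative-index wraparound (a scattered wraparound fill no one would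
-- specify), so both kinds are excluded.
def Pre_MergeCell (data : List (List (List String))) (merge : List (List (Int × Int × Int × Int))) (merge_x : Bool) (merge_y : Bool) (strip_x : Bool) : Prop :=
  ∀ p ∈ data.zip merge, ∀ rect ∈ p.2, rect.1 < rect.2.1 → rect.2.2.1 < rect.2.2.2 →
    0 ≤ rect.1 ∧ rect.2.1 ≤ (p.1.length : Int) ∧ 0 ≤ rect.2.2.1 ∧
    ∀ rp ∈ PySem.List.enumerate p.1 0, rect.1 ≤ rp.1 → rp.1 < rect.2.1 →
      rect.2.2.2 ≤ (rp.2.length : Int)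
instance (data : List (List (List String))) (merge : List (List (Int × Int × Int × Int))) (merge_x : Bool) (merge_y : Bool) (strip_x : Bool) : Decidable (Pre_MergeCell data merge merge_x merge_y strip_x) := by unfold Pre_MergeCell; infer_instance

def pvWitness_MergeCell : List (List (List String)) × (List (List (Int × Int × Int × Int))) × Bool × Bool × Bool :=
  ([[["a", "b"], ["c", "d"]]], [[(0, 2, 0, 2)]], true, true, false)

def Spec_MergeCell (data : List (List (List String))) (merge : List (List (Int × Int × Int × Int))) (merge_x : Bool) (merge_y : Bool) (strip_x : Bool) (out : List (List (List String))) : Prop := out = MergeCell_alt data merge merge_x merge_y strip_x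
instance (data : List (List (List String))) (merge : List (List (Int × Int × Int × Int))) (merge_x : Bool) (merge_y : Bool) (strip_x : Bool) (out : List (List (List String))) : Decidable (Spec_MergeCell data merge merge_x merge_y strip_x out) := by unfold Spec_MergeCell; infer_instance

-- ===== CLAIM (what is proved, stated in full; the proofs are below) =====
def Claim_equal_MergeCell : Prop := ∀ (data : List (List (List String))) (merge : List (List (Int × Int × Int × Int))) (merge_x : Bool) (merge_y : Bool) (strip_x : Bool), Dom_MergeCell data merge merge_x merge_y strip_x → Pre_MergeCell data merge merge_x merge_y strip_x → Spec_MergeCell data merge merge_x merge_y strip_x (MergeCell data merge merge_x merge_y strip_x)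

-- ===== LEMMAS AND PROOFS =====

-- the cell at (row i, column j) of a grid
def pvCell (g : List (List (Option String))) (i j : Nat) : Option (Option String) :=
  g[i]?.bind (fun row => row[j]?)

-- the shape (list of row lengths) of a grid
def pvShp (g : List (List (Option String))) : List Nat := g.map List.length

-- does rect cover cell (i, j)?
abbrev pvCover (rect : Int × Int × Int × Int) (i j : Int) : Prop :=
  rect.1 ≤ i ∧ i < rect.2.1 ∧ rect.2.2.1 ≤ j ∧ j < rect.2.2.2

-- the anchor of the LAST rectangle covering (i, j), if any (last write wins in both programs)
def pvOwn (sm : List (Int × Int × Int × Int)) (i j : Int) : Option (Int × Int) :=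
  sm.foldl (fun acc rect => if pvCover rect i j then some (rect.1, rect.2.2.1) else acc) none

-- the value both programs put at a covered cell owned by anchor a
def pvAval (sd : List (List String)) (mx my sx : Bool) (i j : Int) (a : Int × Int) : Option String :=
  if (!mx && decide (a.2 < j)) || (!my && decide (a.1 < i)) then (if sx then none else some "")
  else some (cellGet sd a.1 a.2)

-- the value of output cell (i, j), before stripping, as a function of ownership
def pvVal (sd : List (List String)) (sm : List (Int × Int × Int × Int)) (mx my sx : Bool)
    (i j : Int) (cell : String) : Option String :=
  (pvOwn sm i j).elim (some cell) (pvAval sd mx my sx i j)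

theorem pvOwn_fold (i j : Int) (sm : List (Int × Int × Int × Int)) :
    ∀ acc : Option (Int × Int),
      sm.foldl (fun acc rect => if pvCover rect i j then some (rect.1, rect.2.2.1) else acc) acc
        = (pvOwn sm i j).elim acc some := by
  induction sm with
  | nil => intro acc; rfl
  | cons rect rest ih =>
    intro acc
    have h1 := ih (if pvCover rect i j then some (rect.1, rect.2.2.1) else acc)
    have h2 : pvOwn (rect :: rest) i j
        = (pvOwn rest i j).elim (if pvCover rect i j then some (rect.1, rect.2.2.1) else none) some := by
      unfold pvOwn; rw [List.foldl_cons]; exact ih _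
    rw [show ((rect :: rest).foldl (fun acc rect => if pvCover rect i j then some (rect.1, rect.2.2.1) else acc) acc)
        = rest.foldl (fun acc rect => if pvCover rect i j then some (rect.1, rect.2.2.1) else acc)
            (if pvCover rect i j then some (rect.1, rect.2.2.1) else acc) from rfl, h1, h2]
    cases pvOwn rest i j with
    | some x => rfl
    | none =>
      by_cases hc : pvCover rect i j
      · rw [if_pos hc, if_pos hc]; rfl
      · rw [if_neg hc, if_neg hc]; rfl

theorem shp_cellSet (g : List (List (Option String))) {r c : Int} (v : Option String)
    (hr : 0 ≤ r) (hc : 0 ≤ c) : pvShp (cellSet g r c v) = pvShp g := by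
  unfold cellSet pvShp
  rw [PySem.List.pySetD_of_nonneg _ _ hr, PySem.List.pySetD_of_nonneg _ _ hc,
      PySem.List.pyGetD_of_nonneg _ _ hr]
  by_cases h : r.toNat < g.length
  · rw [List.map_set]
    have hgd : g.getD r.toNat [] = g[r.toNat] := by
      rw [List.getD_eq_getElem?_getD, List.getElem?_eq_getElem h]; rfl
    rw [hgd, List.length_set]
    have h2 : g[r.toNat].length = (g.map List.length)[r.toNat]'(by simpa using h) := by simp
    rw [h2]
    exact List.set_getElem_self (by simpa using h)
  · rw [List.set_eq_of_length_le (by omega)]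

theorem cell_cellSet (g : List (List (Option String))) {r c : Int} (v : Option String)
    (hr : 0 ≤ r) (hc : 0 ≤ c) (i j : Nat) :
    pvCell (cellSet g r c v) i j =
      if (i : Int) = r ∧ (j : Int) = c then (pvCell g i j).map (fun _ => v) else pvCell g i j := by
  unfold cellSet pvCell
  rw [PySem.List.pySetD_of_nonneg _ _ hr, PySem.List.pySetD_of_nonneg _ _ hc,
      PySem.List.pyGetD_of_nonneg _ _ hr]
  by_cases hi : (i : Int) = r
  · have hi' : r.toNat = i := by omega
    by_cases hl : i < g.length
    · rw [List.getElem?_set, if_pos hi', hi', if_pos hl]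
      have hrow : g.getD i [] = g[i] := by
        rw [List.getD_eq_getElem?_getD, List.getElem?_eq_getElem hl]; rfl
      have hb : ∀ (x : List (Option String)) (fn : List (Option String) → Option (Option String)),
          (some x).bind fn = fn x := fun _ _ => rfl
      rw [hrow, List.getElem?_eq_getElem hl, hb, hb, List.getElem?_set]
      by_cases hj : (j : Int) = c
      · have hj' : c.toNat = j := by omega
        rw [if_pos hj', hj', if_pos (show (i : Int) = r ∧ (j : Int) = c from ⟨hi, hj⟩)]
        by_cases hjl : j < g[i].length
        · rw [if_pos hjl, List.getElem?_eq_getElem hjl]; rfl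
        · rw [if_neg hjl, List.getElem?_eq_none (by omega)]; rfl
      · rw [if_neg (show ¬ c.toNat = j by omega), if_neg (fun h => hj h.2)]
        try exact (hb _ _).symm
    · rw [List.getElem?_set, if_pos hi', hi', if_neg hl, List.getElem?_eq_none (by omega)]
      split_ifs <;> rfl
  · have hi' : ¬ r.toNat = i := by omega
    rw [List.getElem?_set, if_neg hi', if_neg (fun h => hi h.1)]

theorem grid_ext {g1 g2 : List (List (Option String))} (hs : pvShp g1 = pvShp g2)
    (hc : ∀ i j, pvCell g1 i j = pvCell g2 i j) : g1 = g2 := by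
  have hlen : g1.length = g2.length := by
    have := congrArg List.length hs; simpa [pvShp] using this
  apply List.ext_getElem?
  intro i
  by_cases h : i < g1.length
  · have h2 : i < g2.length := by omega
    rw [List.getElem?_eq_getElem h, List.getElem?_eq_getElem h2]
    have hrow : g1[i] = g2[i] := by
      apply List.ext_getElem?
      intro j
      have := hc i j
      unfold pvCell at this
      rw [List.getElem?_eq_getElem h, List.getElem?_eq_getElem h2] at this
      simpa using this
    rw [hrow]
  · rw [List.getElem?_eq_none (by omega), List.getElem?_eq_none (by omega)]

theorem shp_rowFoldAux (f : Int → Option String) {r : Int} (hr : 0 ≤ r) (c2 : Int) :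
    ∀ (n : Nat) (c1 : Int) (g : List (List (Option String))), (c2 - c1).toNat ≤ n →
      (∀ c, c1 ≤ c → c < c2 → 0 ≤ c) →
      pvShp ((PySem.List.pyRange c1 c2 1).foldl (fun g c => cellSet g r c (f c)) g) = pvShp g := by
  intro n
  induction n with
  | zero =>
    intro c1 g hn hc
    rw [PySem.List.pyRange_one_eq_nil (by omega), List.foldl_nil]
  | succ n ih =>
    intro c1 g hn hc
    by_cases hlt : c1 < c2
    · rw [PySem.List.pyRange_one_cons hlt]
      simp only [List.foldl_cons]
      rw [ih (c1 + 1) (cellSet g r c1 (f c1)) (by omega) (fun c h1 h2 => hc c (by omega) h2)]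
      exact shp_cellSet g (f c1) hr (hc c1 le_rfl hlt)
    · rw [PySem.List.pyRange_one_eq_nil (by omega), List.foldl_nil]

theorem cell_rowFoldAux (f : Int → Option String) {r : Int} (hr : 0 ≤ r) (c2 : Int) (i j : Nat) :
    ∀ (n : Nat) (c1 : Int) (g : List (List (Option String))), (c2 - c1).toNat ≤ n →
      (∀ c, c1 ≤ c → c < c2 → 0 ≤ c) →
      pvCell ((PySem.List.pyRange c1 c2 1).foldl (fun g c => cellSet g r c (f c)) g) i j =
        if (i : Int) = r ∧ c1 ≤ (j : Int) ∧ (j : Int) < c2 then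
          (pvCell g i j).map (fun _ => f j)
        else pvCell g i j := by
  intro n
  induction n with
  | zero =>
    intro c1 g hn hc
    rw [PySem.List.pyRange_one_eq_nil (by omega), List.foldl_nil, if_neg (by omega)]
  | succ n ih =>
    intro c1 g hn hc
    by_cases hlt : c1 < c2
    · rw [PySem.List.pyRange_one_cons hlt]
      simp only [List.foldl_cons]
      rw [ih (c1 + 1) (cellSet g r c1 (f c1)) (by omega) (fun c h1 h2 => hc c (by omega) h2),
          cell_cellSet g (f c1) hr (hc c1 le_rfl hlt) i j]
      split_ifs <;>
        first
          | rfl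
          | (exfalso; omega)
          | (cases pvCell g i j <;> simp_all)
    · rw [PySem.List.pyRange_one_eq_nil (by omega), List.foldl_nil, if_neg (by omega)]

theorem shp_rectFold (f : Int → Int → Option String) {c1 c2 : Int}
    (hc : ∀ c, c1 ≤ c → c < c2 → 0 ≤ c) (r2 : Int) :
    ∀ (n : Nat) (r1 : Int) (g : List (List (Option String))), (r2 - r1).toNat ≤ n →
      (∀ r, r1 ≤ r → r < r2 → 0 ≤ r) →
      pvShp ((PySem.List.pyRange r1 r2 1).foldl (fun g r =>
          (PySem.List.pyRange c1 c2 1).foldl (fun g c => cellSet g r c (f r c)) g) g) = pvShp g := by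
  intro n
  induction n with
  | zero =>
    intro r1 g hn hrs
    rw [PySem.List.pyRange_one_eq_nil (show r2 ≤ r1 by omega), List.foldl_nil]
  | succ n ih =>
    intro r1 g hn hrs
    by_cases hlt : r1 < r2
    · rw [PySem.List.pyRange_one_cons hlt]
      simp only [List.foldl_cons]
      rw [ih (r1 + 1) _ (by omega) (fun r h1 h2 => hrs r (by omega) h2)]
      exact shp_rowFoldAux (fun c => f r1 c) (hrs r1 le_rfl hlt) c2 (c2 - c1).toNat c1 g le_rfl hc
    · rw [PySem.List.pyRange_one_eq_nil (show r2 ≤ r1 by omega), List.foldl_nil]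

theorem cell_rectFold (f : Int → Int → Option String) {c1 c2 : Int}
    (hc : ∀ c, c1 ≤ c → c < c2 → 0 ≤ c) (r2 : Int) (i j : Nat) :
    ∀ (n : Nat) (r1 : Int) (g : List (List (Option String))), (r2 - r1).toNat ≤ n →
      (∀ r, r1 ≤ r → r < r2 → 0 ≤ r) →
      pvCell ((PySem.List.pyRange r1 r2 1).foldl (fun g r =>
          (PySem.List.pyRange c1 c2 1).foldl (fun g c => cellSet g r c (f r c)) g) g) i j =
        if r1 ≤ (i : Int) ∧ (i : Int) < r2 ∧ c1 ≤ (j : Int) ∧ (j : Int) < c2 then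
          (pvCell g i j).map (fun _ => f i j)
        else pvCell g i j := by
  intro n
  induction n with
  | zero =>
    intro r1 g hn hrs
    rw [PySem.List.pyRange_one_eq_nil (show r2 ≤ r1 by omega), List.foldl_nil, if_neg (by omega)]
  | succ n ih =>
    intro r1 g hn hrs
    by_cases hlt : r1 < r2
    · rw [PySem.List.pyRange_one_cons hlt]
      simp only [List.foldl_cons]
      rw [ih (r1 + 1) _ (by omega) (fun r h1 h2 => hrs r (by omega) h2),
          cell_rowFoldAux (fun c => f r1 c) (hrs r1 le_rfl hlt) c2 i j (c2 - c1).toNat c1 g le_rfl hc]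
      split_ifs <;>
        first
          | rfl
          | (exfalso; omega)
          | (cases pvCell g i j <;> simp_all)
    · rw [PySem.List.pyRange_one_eq_nil (show r2 ≤ r1 by omega), List.foldl_nil, if_neg (by omega)]

theorem foldl_id {α β : Type} (l : List α) (g : β) : l.foldl (fun g _ => g) g = g := by
  induction l generalizing g with
  | nil => rfl
  | cons x xs ih => exact ih g

-- B-side: the ownership dict lookup computes pvOwn
theorem get?_colFold (v : Int × Int) (r : Int) (c2 i j : Int) :
    ∀ (n : Nat) (c1 : Int) (d : PySem.Dict (Int × Int) (Int × Int)), (c2 - c1).toNat ≤ n →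
      PySem.Dict.get? ((PySem.List.pyRange c1 c2 1).foldl (fun d c => d.insert (r, c) v) d) (i, j)
        = if i = r ∧ c1 ≤ j ∧ j < c2 then some v else PySem.Dict.get? d (i, j) := by
  intro n
  induction n with
  | zero =>
    intro c1 d hn
    rw [PySem.List.pyRange_one_eq_nil (by omega), List.foldl_nil, if_neg (by omega)]
  | succ n ih =>
    intro c1 d hn
    by_cases hlt : c1 < c2
    · rw [PySem.List.pyRange_one_cons hlt]
      simp only [List.foldl_cons]
      rw [ih (c1 + 1) _ (by omega), PySem.Dict.get?_insert]
      simp only [Prod.mk.injEq]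
      split_ifs <;> first | rfl | (exfalso; omega)
    · rw [PySem.List.pyRange_one_eq_nil (by omega), List.foldl_nil, if_neg (by omega)]

theorem get?_rectFold (v : Int × Int) (lo : Int) (hi : Int → Int) (r2 i j : Int) :
    ∀ (n : Nat) (r1 : Int) (d : PySem.Dict (Int × Int) (Int × Int)), (r2 - r1).toNat ≤ n →
      PySem.Dict.get? ((PySem.List.pyRange r1 r2 1).foldl (fun d r =>
          (PySem.List.pyRange lo (hi r) 1).foldl (fun d c => d.insert (r, c) v) d) d) (i, j)
        = if r1 ≤ i ∧ i < r2 ∧ lo ≤ j ∧ j < hi i then some v else PySem.Dict.get? d (i, j) := by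
  intro n
  induction n with
  | zero =>
    intro r1 d hn
    rw [show PySem.List.pyRange r1 r2 1 = [] from PySem.List.pyRange_one_eq_nil (by omega),
      List.foldl_nil, if_neg (by omega)]
  | succ n ih =>
    intro r1 d hn
    by_cases hlt : r1 < r2
    · rw [PySem.List.pyRange_one_cons hlt]
      simp only [List.foldl_cons]
      rw [ih (r1 + 1) _ (by omega), get?_colFold v r1 (hi r1) i j ((hi r1) - lo).toNat lo d le_rfl]
      by_cases hir : i = r1
      · subst hir
        split_ifs <;> first | rfl | (exfalso; omega)
      · split_ifs <;> first | rfl | (exfalso; omega)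
    · rw [show PySem.List.pyRange r1 r2 1 = [] from PySem.List.pyRange_one_eq_nil (by omega),
        List.foldl_nil, if_neg (by omega)]

-- the clipped cover used by ownerIndex
abbrev pvCoverClip (sd : List (List String)) (rect : Int × Int × Int × Int) (i j : Int) : Prop :=
  max rect.1 0 ≤ i ∧ i < min rect.2.1 (sd.length : Int) ∧ max rect.2.2.1 0 ≤ j ∧
    j < min rect.2.2.2 ((PySem.List.pyGetD sd i []).length : Int)

def pvOwnClip (sd : List (List String)) (sm : List (Int × Int × Int × Int)) (i j : Int) :
    Option (Int × Int) :=
  sm.foldl (fun acc rect => if pvCoverClip sd rect i j then some (rect.1, rect.2.2.1) else acc) none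

theorem pvOwnClip_fold (sd : List (List String)) (i j : Int) (sm : List (Int × Int × Int × Int)) :
    ∀ acc : Option (Int × Int),
      sm.foldl (fun acc rect => if pvCoverClip sd rect i j then some (rect.1, rect.2.2.1) else acc) acc
        = (pvOwnClip sd sm i j).elim acc some := by
  induction sm with
  | nil => intro acc; rfl
  | cons rect rest ih =>
    intro acc
    have h1 := ih (if pvCoverClip sd rect i j then some (rect.1, rect.2.2.1) else acc)
    have h2 : pvOwnClip sd (rect :: rest) i j
        = (pvOwnClip sd rest i j).elim
            (if pvCoverClip sd rect i j then some (rect.1, rect.2.2.1) else none) some := by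
      unfold pvOwnClip; rw [List.foldl_cons]; exact ih _
    rw [show ((rect :: rest).foldl
        (fun acc rect => if pvCoverClip sd rect i j then some (rect.1, rect.2.2.1) else acc) acc)
        = rest.foldl (fun acc rect => if pvCoverClip sd rect i j then some (rect.1, rect.2.2.1) else acc)
            (if pvCoverClip sd rect i j then some (rect.1, rect.2.2.1) else acc) from rfl, h1, h2]
    cases pvOwnClip sd rest i j with
    | some x => rfl
    | none =>
      by_cases hc : pvCoverClip sd rect i j
      · rw [if_pos hc, if_pos hc]; rfl
      · rw [if_neg hc, if_neg hc]; rfl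

theorem get?_ownerIndex_aux (sd : List (List String)) (i j : Int)
    (sm : List (Int × Int × Int × Int)) :
    ∀ d : PySem.Dict (Int × Int) (Int × Int),
      PySem.Dict.get? (sm.foldl (fun d rect =>
        (PySem.List.pyRange (max rect.1 0) (min rect.2.1 (sd.length : Int)) 1).foldl (fun d r =>
          (PySem.List.pyRange (max rect.2.2.1 0)
              (min rect.2.2.2 ((PySem.List.pyGetD sd r []).length : Int)) 1).foldl (fun d c =>
            d.insert (r, c) (rect.1, rect.2.2.1)) d) d) d) (i, j)
        = (pvOwnClip sd sm i j).elim (PySem.Dict.get? d (i, j)) some := by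
  induction sm with
  | nil => intro d; rfl
  | cons rect rest ih =>
    intro d
    rw [List.foldl_cons, ih]
    have hstep : PySem.Dict.get? ((PySem.List.pyRange (max rect.1 0)
        (min rect.2.1 (sd.length : Int)) 1).foldl (fun d r =>
        (PySem.List.pyRange (max rect.2.2.1 0)
            (min rect.2.2.2 ((PySem.List.pyGetD sd r []).length : Int)) 1).foldl (fun d c =>
          d.insert (r, c) (rect.1, rect.2.2.1)) d) d) (i, j)
        = if pvCoverClip sd rect i j then some (rect.1, rect.2.2.1)
          else PySem.Dict.get? d (i, j) := by
      rw [get?_rectFold (rect.1, rect.2.2.1) (max rect.2.2.1 0)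
          (fun r => min rect.2.2.2 ((PySem.List.pyGetD sd r []).length : Int))
          (min rect.2.1 (sd.length : Int)) i j
          (min rect.2.1 (sd.length : Int) - max rect.1 0).toNat (max rect.1 0) d le_rfl]
    have hcons : pvOwnClip sd (rect :: rest) i j
        = (pvOwnClip sd rest i j).elim
            (if pvCoverClip sd rect i j then some (rect.1, rect.2.2.1) else none) some := by
      unfold pvOwnClip; rw [List.foldl_cons]; exact pvOwnClip_fold sd i j rest _
    rw [hstep, hcons]
    cases pvOwnClip sd rest i j with
    | some x => rfl
    | none =>
      by_cases hc : pvCoverClip sd rect i j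
      · rw [if_pos hc, if_pos hc]; rfl
      · rw [if_neg hc, if_neg hc]; rfl

-- at a cell that exists in the grid, the clipped and the unclipped ownership agree
theorem get?_ownerIndex (sd : List (List String)) (sm : List (Int × Int × Int × Int)) (i j : Int)
    (hi0 : 0 ≤ i) (hilen : i < (sd.length : Int)) (hj0 : 0 ≤ j)
    (hjlen : j < ((PySem.List.pyGetD sd i []).length : Int)) :
    PySem.Dict.get? (ownerIndex sd sm) (i, j) = pvOwn sm i j := by
  unfold ownerIndex
  rw [get?_ownerIndex_aux sd i j sm PySem.Dict.empty]
  have hcl : pvOwnClip sd sm i j = pvOwn sm i j := by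
    unfold pvOwnClip pvOwn
    induction sm using List.reverseRecOn with
    | nil => rfl
    | append_singleton rest rect ihr =>
      rw [List.foldl_append, List.foldl_append, ihr]
      simp only [List.foldl_cons, List.foldl_nil]
      have : pvCoverClip sd rect i j ↔ pvCover rect i j := by
        unfold pvCoverClip pvCover; omega
      rw [if_congr this rfl rfl]
  rw [hcl]
  cases pvOwn sm i j <;> simp [PySem.Dict.get?_empty]

-- A-side: the mutated grid, cell by cell, in terms of pvOwn
theorem A_fold_shp (sd : List (List String)) (mx my sx : Bool)
    (sm : List (Int × Int × Int × Int))
    (hpre : ∀ rect ∈ sm, ∀ r ∈ PySem.List.pyRange rect.1 rect.2.1 1,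
      ∀ c ∈ PySem.List.pyRange rect.2.2.1 rect.2.2.2 1, 0 ≤ r ∧ 0 ≤ c) :
    ∀ g : List (List (Option String)),
      pvShp (sm.foldl (fun g rect =>
        (PySem.List.pyRange rect.1 rect.2.1 1).foldl (fun g r =>
          (PySem.List.pyRange rect.2.2.1 rect.2.2.2 1).foldl (fun g c =>
            if (!mx && decide (rect.2.2.1 < c)) || (!my && decide (rect.1 < r)) then
              cellSet g r c (if sx then none else some "")
            else
              cellSet g r c (some (cellGet sd rect.1 rect.2.2.1))) g) g) g) = pvShp g := by
  induction sm with
  | nil => intro g; rfl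
  | cons rect rest ih =>
    intro g
    rw [List.foldl_cons, ih (fun rc hm => hpre rc (List.mem_cons_of_mem _ hm))]
    by_cases hg : rect.1 < rect.2.1 ∧ rect.2.2.1 < rect.2.2.2
    · have hr' : ∀ r, rect.1 ≤ r → r < rect.2.1 → 0 ≤ r := fun r ha hb =>
        (hpre rect (List.mem_cons_self) r (PySem.List.mem_pyRange_one.mpr ⟨ha, hb⟩)
          rect.2.2.1 (PySem.List.mem_pyRange_one.mpr ⟨le_rfl, hg.2⟩)).1
      have hc' : ∀ c, rect.2.2.1 ≤ c → c < rect.2.2.2 → 0 ≤ c := fun c ha hb =>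
        (hpre rect (List.mem_cons_self) rect.1 (PySem.List.mem_pyRange_one.mpr ⟨le_rfl, hg.1⟩)
          c (PySem.List.mem_pyRange_one.mpr ⟨ha, hb⟩)).2
      have hA := PySem.List.foldl_congr_mem (PySem.List.pyRange rect.1 rect.2.1 1)
        (fun g r => (PySem.List.pyRange rect.2.2.1 rect.2.2.2 1).foldl (fun g c =>
          if (!mx && decide (rect.2.2.1 < c)) || (!my && decide (rect.1 < r)) then
            cellSet g r c (if sx then none else some "")
          else cellSet g r c (some (cellGet sd rect.1 rect.2.2.1))) g)
        (fun g r => (PySem.List.pyRange rect.2.2.1 rect.2.2.2 1).foldl (fun g c =>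
          cellSet g r c (if (!mx && decide (rect.2.2.1 < c)) || (!my && decide (rect.1 < r)) then
            (if sx then none else some "") else some (cellGet sd rect.1 rect.2.2.1))) g) g
        (fun acc r _ => PySem.List.foldl_congr_mem _ _ _ _ (fun acc2 c _ =>
          (apply_ite (fun v => cellSet acc2 r c v) _ _ _).symm))
      rw [hA]
      exact shp_rectFold _ hc' rect.2.1 (rect.2.1 - rect.1).toNat rect.1 g le_rfl hr'
    · by_cases h2 : rect.1 < rect.2.1
      · have hcc : rect.2.2.2 ≤ rect.2.2.1 := by omega
        rw [show (PySem.List.pyRange rect.2.2.1 rect.2.2.2 1) = [] from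
          PySem.List.pyRange_one_eq_nil hcc]
        simp only [List.foldl_nil]
        rw [foldl_id]
      · rw [show PySem.List.pyRange rect.1 rect.2.1 1 = [] from
          PySem.List.pyRange_one_eq_nil (by omega), List.foldl_nil]

theorem A_fold_cell (sd : List (List String)) (mx my sx : Bool) (i j : Nat)
    (sm : List (Int × Int × Int × Int))
    (hpre : ∀ rect ∈ sm, ∀ r ∈ PySem.List.pyRange rect.1 rect.2.1 1,
      ∀ c ∈ PySem.List.pyRange rect.2.2.1 rect.2.2.2 1, 0 ≤ r ∧ 0 ≤ c) :
    ∀ g : List (List (Option String)),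
      pvCell (sm.foldl (fun g rect =>
        (PySem.List.pyRange rect.1 rect.2.1 1).foldl (fun g r =>
          (PySem.List.pyRange rect.2.2.1 rect.2.2.2 1).foldl (fun g c =>
            if (!mx && decide (rect.2.2.1 < c)) || (!my && decide (rect.1 < r)) then
              cellSet g r c (if sx then none else some "")
            else
              cellSet g r c (some (cellGet sd rect.1 rect.2.2.1))) g) g) g) i j
        = (pvOwn sm (i : Int) (j : Int)).elim (pvCell g i j)
            (fun a => (pvCell g i j).map (fun _ => pvAval sd mx my sx (i : Int) (j : Int) a)) := by
  induction sm with
  | nil => intro g; rfl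
  | cons rect rest ih =>
    intro g
    rw [List.foldl_cons, ih (fun rc hm => hpre rc (List.mem_cons_of_mem _ hm))]
    have hstep : pvCell ((PySem.List.pyRange rect.1 rect.2.1 1).foldl (fun g r =>
        (PySem.List.pyRange rect.2.2.1 rect.2.2.2 1).foldl (fun g c =>
          if (!mx && decide (rect.2.2.1 < c)) || (!my && decide (rect.1 < r)) then
            cellSet g r c (if sx then none else some "")
          else
            cellSet g r c (some (cellGet sd rect.1 rect.2.2.1))) g) g) i j
        = if pvCover rect (i : Int) (j : Int) then
            (pvCell g i j).map (fun _ => pvAval sd mx my sx (i : Int) (j : Int) (rect.1, rect.2.2.1))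
          else pvCell g i j := by
      by_cases hg : rect.1 < rect.2.1 ∧ rect.2.2.1 < rect.2.2.2
      · have hr' : ∀ r, rect.1 ≤ r → r < rect.2.1 → 0 ≤ r := fun r ha hb =>
          (hpre rect (List.mem_cons_self) r (PySem.List.mem_pyRange_one.mpr ⟨ha, hb⟩)
            rect.2.2.1 (PySem.List.mem_pyRange_one.mpr ⟨le_rfl, hg.2⟩)).1
        have hc' : ∀ c, rect.2.2.1 ≤ c → c < rect.2.2.2 → 0 ≤ c := fun c ha hb =>
          (hpre rect (List.mem_cons_self) rect.1 (PySem.List.mem_pyRange_one.mpr ⟨le_rfl, hg.1⟩)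
            c (PySem.List.mem_pyRange_one.mpr ⟨ha, hb⟩)).2
        have hA := PySem.List.foldl_congr_mem (PySem.List.pyRange rect.1 rect.2.1 1)
          (fun g r => (PySem.List.pyRange rect.2.2.1 rect.2.2.2 1).foldl (fun g c =>
            if (!mx && decide (rect.2.2.1 < c)) || (!my && decide (rect.1 < r)) then
              cellSet g r c (if sx then none else some "")
            else cellSet g r c (some (cellGet sd rect.1 rect.2.2.1))) g)
          (fun g r => (PySem.List.pyRange rect.2.2.1 rect.2.2.2 1).foldl (fun g c =>
            cellSet g r c (if (!mx && decide (rect.2.2.1 < c)) || (!my && decide (rect.1 < r)) then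
              (if sx then none else some "") else some (cellGet sd rect.1 rect.2.2.1))) g) g
          (fun acc r _ => PySem.List.foldl_congr_mem _ _ _ _ (fun acc2 c _ =>
            (apply_ite (fun v => cellSet acc2 r c v) _ _ _).symm))
        rw [hA, cell_rectFold (fun r c =>
            if (!mx && decide (rect.2.2.1 < c)) || (!my && decide (rect.1 < r)) then
              (if sx then none else some "") else some (cellGet sd rect.1 rect.2.2.1))
            hc' rect.2.1 i j (rect.2.1 - rect.1).toNat rect.1 g le_rfl hr']
        unfold pvCover pvAval
        split_ifs <;> rfl
      · have hcov : ¬ pvCover rect (i : Int) (j : Int) := by unfold pvCover; omega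
        rw [if_neg hcov]
        by_cases h2 : rect.1 < rect.2.1
        · have hcc : rect.2.2.2 ≤ rect.2.2.1 := by omega
          rw [show (PySem.List.pyRange rect.2.2.1 rect.2.2.2 1) = [] from
            PySem.List.pyRange_one_eq_nil hcc]
          simp only [List.foldl_nil]
          rw [foldl_id]
        · rw [show PySem.List.pyRange rect.1 rect.2.1 1 = [] from
            PySem.List.pyRange_one_eq_nil (by omega), List.foldl_nil]
    rw [hstep]
    have hcons : pvOwn (rect :: rest) (i : Int) (j : Int)
        = (pvOwn rest (i : Int) (j : Int)).elim
            (if pvCover rect (i : Int) (j : Int) then some (rect.1, rect.2.2.1) else none) some := by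
      unfold pvOwn; rw [List.foldl_cons]; exact pvOwn_fold _ _ rest _
    rw [hcons]
    cases pvOwn rest (i : Int) (j : Int) with
    | some x =>
      simp only [Option.elim]
      by_cases hc : pvCover rect (i : Int) (j : Int) <;>
        [ (rw [if_pos hc]; cases pvCell g i j <;> rfl); rw [if_neg hc]]
    | none =>
      by_cases hc : pvCover rect (i : Int) (j : Int)
      · rw [if_pos hc, if_pos hc]; rfl
      · rw [if_neg hc, if_neg hc]; rfl

-- the per-sheet equality
theorem sheet_eq (sd : List (List String)) (sm : List (Int × Int × Int × Int)) (mx my sx : Bool)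
    (hpre : ∀ rect ∈ sm, ∀ r ∈ PySem.List.pyRange rect.1 rect.2.1 1,
      ∀ c ∈ PySem.List.pyRange rect.2.2.1 rect.2.2.2 1, 0 ≤ r ∧ 0 ≤ c) :
    stripGrid sx (sm.foldl (fun g rect =>
      (PySem.List.pyRange rect.1 rect.2.1 1).foldl (fun g r =>
        (PySem.List.pyRange rect.2.2.1 rect.2.2.2 1).foldl (fun g c =>
          if (!mx && decide (rect.2.2.1 < c)) || (!my && decide (rect.1 < r)) then
            cellSet g r c (if sx then none else some "")
          else
            cellSet g r c (some (cellGet sd rect.1 rect.2.2.1))) g) g)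
      (sd.map (fun row => row.map some)))
    = (PySem.List.enumerate sd 0).foldl (fun sh rp =>
        sh ++ [renderRow sd (ownerIndex sd sm) mx my sx rp.1 rp.2]) [] := by
  -- the mutated grid equals the grid rendered pointwise from pvOwn
  have hG : (sm.foldl (fun g rect =>
      (PySem.List.pyRange rect.1 rect.2.1 1).foldl (fun g r =>
        (PySem.List.pyRange rect.2.2.1 rect.2.2.2 1).foldl (fun g c =>
          if (!mx && decide (rect.2.2.1 < c)) || (!my && decide (rect.1 < r)) then
            cellSet g r c (if sx then none else some "")
          else
            cellSet g r c (some (cellGet sd rect.1 rect.2.2.1))) g) g)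
      (sd.map (fun row => row.map some)))
      = (PySem.List.enumerate sd 0).map (fun rp =>
          (PySem.List.enumerate rp.2 0).map (fun cp => pvVal sd sm mx my sx rp.1 cp.1 cp.2)) := by
    apply grid_ext
    · rw [A_fold_shp sd mx my sx sm hpre]
      unfold pvShp
      rw [List.map_map, List.map_map]
      have h1 : sd.map (List.length ∘ fun row => row.map some) = sd.map List.length := by
        apply List.map_congr_left; intro row _; simp
      rw [h1]
      have h2 : (PySem.List.enumerate sd 0).map
          ((List.length ∘ fun rp : Int × List String =>
            (PySem.List.enumerate rp.2 0).map (fun cp => pvVal sd sm mx my sx rp.1 cp.1 cp.2)))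
          = (PySem.List.enumerate sd 0).map (fun rp => rp.2.length) := by
        apply List.map_congr_left; intro rp _; simp [PySem.List.length_enumerate]
      rw [h2, show (fun rp : Int × List String => rp.2.length)
          = List.length ∘ (fun rp : Int × List String => rp.2) from rfl, ← List.map_map,
        PySem.List.map_snd_enumerate]
    · intro i j
      rw [A_fold_cell sd mx my sx i j sm hpre]
      unfold pvCell
      cases hrow : sd[i]? with
      | none =>
        simp only [List.getElem?_map, PySem.List.getElem?_enumerate, hrow, Option.map_none,
          Option.bind_none]
        cases pvOwn sm (i : Int) (j : Int) <;> rfl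
      | some row =>
        cases hcell : row[j]? with
        | none =>
          simp only [List.getElem?_map, PySem.List.getElem?_enumerate, hrow,
            Option.map_some, Option.bind_some, List.getElem?_map, hcell, Option.map_none]
          cases pvOwn sm (i : Int) (j : Int) <;> rfl
        | some cell =>
          simp only [List.getElem?_map, PySem.List.getElem?_enumerate, hrow, hcell,
            Option.map_some, Option.bind_some, List.getElem?_map, zero_add]
          unfold pvVal
          cases pvOwn sm (i : Int) (j : Int) <;> rfl
  rw [hG, PySem.List.foldl_append_singleton_eq_map, List.nil_append]
  unfold stripGrid
  cases sx with
  | true =>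
    rw [if_pos rfl, List.map_map]
    apply List.map_congr_left
    intro rp hrp
    unfold renderRow
    obtain ⟨k, hk, hrpk⟩ := (PySem.List.mem_enumerate_iff _ _ _).mp hrp
    have hpg : PySem.List.pyGetD sd rp.1 [] = rp.2 := by
      subst hrpk
      simp only [zero_add, PySem.List.pyGetD_natCast]
      rw [List.getD_eq_getElem?_getD, List.getElem?_eq_getElem hk]; rfl
    have hrow : (PySem.List.enumerate rp.2 0).foldl (fun nr cp =>
        match (ownerIndex sd sm).get? (rp.1, cp.1) with
        | none => nr ++ [cp.2]
        | some a =>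
          if (!mx && decide (a.2 < cp.1)) || (!my && decide (a.1 < rp.1)) then
            if !true then nr ++ [""] else nr
          else nr ++ [cellGet sd a.1 a.2]) []
        = (PySem.List.enumerate rp.2 0).foldl (fun nr cp =>
            nr ++ (pvVal sd sm mx my true rp.1 cp.1 cp.2).elim [] (fun v => [v])) [] := by
      apply PySem.List.foldl_congr_mem
      intro acc cp hcp
      obtain ⟨l, hl, hcpl⟩ := (PySem.List.mem_enumerate_iff _ _ _).mp hcp
      rw [get?_ownerIndex sd sm rp.1 cp.1 (by subst hrpk; simp)
        (by subst hrpk; simp; omega) (by subst hcpl; simp)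
        (by rw [hpg]; subst hcpl; simp; omega)]
      unfold pvVal pvAval
      cases pvOwn sm rp.1 cp.1 with
      | none => rfl
      | some a => simp only [Option.elim]; split_ifs <;> simp_all
    rw [hrow, PySem.List.foldl_append_eq_flatMap, List.nil_append]
    simp only [Function.comp]
    induction PySem.List.enumerate rp.2 0 with
    | nil => rfl
    | cons cp rest ihr =>
      rw [List.map_cons, List.filterMap_cons, List.flatMap_cons, ← ihr]
      cases h : pvVal sd sm mx my true rp.1 cp.1 cp.2 <;> simp only [id] <;> rfl
  | false =>
    rw [if_neg (by simp), List.map_map]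
    apply List.map_congr_left
    intro rp hrp
    unfold renderRow
    obtain ⟨k, hk, hrpk⟩ := (PySem.List.mem_enumerate_iff _ _ _).mp hrp
    have hpg : PySem.List.pyGetD sd rp.1 [] = rp.2 := by
      subst hrpk
      simp only [zero_add, PySem.List.pyGetD_natCast]
      rw [List.getD_eq_getElem?_getD, List.getElem?_eq_getElem hk]; rfl
    have hrow : (PySem.List.enumerate rp.2 0).foldl (fun nr cp =>
        match (ownerIndex sd sm).get? (rp.1, cp.1) with
        | none => nr ++ [cp.2]
        | some a =>
          if (!mx && decide (a.2 < cp.1)) || (!my && decide (a.1 < rp.1)) then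
            if !false then nr ++ [""] else nr
          else nr ++ [cellGet sd a.1 a.2]) []
        = (PySem.List.enumerate rp.2 0).foldl (fun nr cp =>
            nr ++ (pvVal sd sm mx my false rp.1 cp.1 cp.2).elim [""] (fun v => [v])) [] := by
      apply PySem.List.foldl_congr_mem
      intro acc cp hcp
      obtain ⟨l, hl, hcpl⟩ := (PySem.List.mem_enumerate_iff _ _ _).mp hcp
      rw [get?_ownerIndex sd sm rp.1 cp.1 (by subst hrpk; simp)
        (by subst hrpk; simp; omega) (by subst hcpl; simp)
        (by rw [hpg]; subst hcpl; simp; omega)]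
      unfold pvVal pvAval
      cases pvOwn sm rp.1 cp.1 with
      | none => rfl
      | some a => simp only [Option.elim]; split_ifs <;> simp_all
    rw [hrow, PySem.List.foldl_append_eq_flatMap, List.nil_append]
    simp only [Function.comp]
    induction PySem.List.enumerate rp.2 0 with
    | nil => rfl
    | cons cp rest ihr =>
      rw [List.map_cons, List.map_cons, List.flatMap_cons, ← ihr]
      cases h : pvVal sd sm mx my false rp.1 cp.1 cp.2 <;> simp only [Option.getD, Option.elim] <;> rfl

-- ===== VERDICT (by name: the statement is the Claim_ definition above) =====
theorem MergeCell_spec : Claim_equal_MergeCell := by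
  intro data merge mx my sx _ hpre
  unfold Spec_MergeCell MergeCell MergeCell_alt
  rw [PySem.List.foldl_append_singleton_eq_map, PySem.List.foldl_append_singleton_eq_map,
    List.nil_append, List.nil_append]
  apply List.map_congr_left
  intro p hp
  refine sheet_eq p.1 p.2 mx my sx (fun rect hm r hr c hc => ?_)
  obtain ⟨hr1, hr2⟩ := PySem.List.mem_pyRange_one.mp hr
  obtain ⟨hc1, hc2⟩ := PySem.List.mem_pyRange_one.mp hc
  have h := hpre p hp rect hm (by omega) (by omega)
  exact ⟨by omega, by omega⟩
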